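-- pv_equiv track=rewrite | github.com/ghostrider77/BioinformaticsProblems | Python/textbook_track/chapter09/ba9q.py | compute_character_classes
-- ===== SOURCE A (Python) =====
-- def compute_character_classes(text, order, n):
--     classes = [0] * n
--     label = 0
--     classes[order[0]] = label
--     for o1, o2 in zip(order, order[1:]):
--         if text[o1] != text[o2]:
--             label += 1
--         classes[o2] = label
--     return tuple(classes)
-- ===== SOURCE B (Python) =====
-- def compute_character_classes(text, order, n):
--     # Partition the order sequence into maximal runs of positions holding
--     # equal characters, then label each position with its run's index.
--     runs = []
--     current = [order[0]]
--     for o1, o2 in zip(order, order[1:]):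
--         if text[o1] != text[o2]:
--             runs.append(current)
--             current = [o2]
--         else:
--             current.append(o2)
--     runs.append(current)
--     classes = [0] * n
--     for label, run in enumerate(runs):
--         for idx in run:
--             classes[idx] = label
--     return tuple(classes)
-- ===== Notes on version B (the rewrite author's own statement) =====
-- stated objective: alternative
-- what changed: A's single stateful pass with a running label counter is replaced by an explicit run-length partition: the order sequence is split into maximal runs of equal-character positions (an intermediate list-of-runs structure), and each position is then labelled with its run's enumerate index; no label counter is maintained.
import Mathlib
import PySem

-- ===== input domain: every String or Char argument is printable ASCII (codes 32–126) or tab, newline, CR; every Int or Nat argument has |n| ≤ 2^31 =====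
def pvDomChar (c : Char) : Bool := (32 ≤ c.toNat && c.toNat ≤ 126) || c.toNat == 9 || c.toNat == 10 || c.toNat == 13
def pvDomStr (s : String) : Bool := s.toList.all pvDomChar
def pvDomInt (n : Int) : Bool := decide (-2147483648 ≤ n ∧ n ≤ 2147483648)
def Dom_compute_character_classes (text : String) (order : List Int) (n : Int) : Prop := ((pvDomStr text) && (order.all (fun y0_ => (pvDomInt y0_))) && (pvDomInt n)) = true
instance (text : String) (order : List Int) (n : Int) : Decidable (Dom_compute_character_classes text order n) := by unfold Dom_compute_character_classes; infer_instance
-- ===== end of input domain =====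

-- B replaces A's running-label pass by an explicit run-length partition of the
-- order sequence (maximal runs of equal-character positions), each position
-- then being labelled with its run's enumerate index; same cost, alternative.

-- ===== PORT A =====
-- classes = [0]*n; label = 0; classes[order[0]] = label;
-- for o1,o2 in zip(order, order[1:]): if text[o1]!=text[o2]: label += 1; classes[o2] = label
def compute_character_classes (text : String) (order : List Int) (n : Int) : List Int :=
  let classes : List Int := List.replicate n.toNat 0
  let classes := PySem.List.pySetD classes (PySem.List.pyGetD order 0 0) 0
  ((order.zip order.tail).foldl
    (fun (s : List Int × Int) (p : Int × Int) =>
      let label := if PySem.Str.pyGet? text p.1 ≠ PySem.Str.pyGet? text p.2 then s.2 + 1 else s.2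
      (PySem.List.pySetD s.1 p.2 label, label))
    (classes, 0)).1

-- ===== PORT B =====
-- runs = []; current = [order[0]]
-- for o1,o2 in zip(order, order[1:]):
--   if text[o1]!=text[o2]: runs.append(current); current=[o2] else: current.append(o2)
-- runs.append(current); classes=[0]*n
-- for label, run in enumerate(runs): for idx in run: classes[idx] = label
def compute_character_classes_alt (text : String) (order : List Int) (n : Int) : List Int :=
  let st :=
    (order.zip order.tail).foldl
      (fun (s : List (List Int) × List Int) (p : Int × Int) =>
        if PySem.Str.pyGet? text p.1 ≠ PySem.Str.pyGet? text p.2 then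
          (s.1 ++ [s.2], [p.2])
        else
          (s.1, s.2 ++ [p.2]))
      ([], [PySem.List.pyGetD order 0 0])
  let runs := st.1 ++ [st.2]
  (PySem.List.enumerate runs 0).foldl
    (fun (c : List Int) (lr : Int × List Int) =>
      lr.2.foldl (fun c idx => PySem.List.pySetD c idx lr.1) c)
    (List.replicate n.toNat 0)

-- ===== PRECONDITION & SPEC =====
-- Pre_ holds exactly where the Python A returns normally: order nonempty, every
-- position a valid (possibly negative) index into classes, and — as soon as the
-- zip loop runs, i.e. len(order) ≥ 2 — also a valid index into text.
def Pre_compute_character_classes (text : String) (order : List Int) (n : Int) : Prop :=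
  order ≠ [] ∧ (∀ o ∈ order, -n ≤ o ∧ o < n) ∧
    (2 ≤ order.length → ∀ o ∈ order, -(PySem.Str.len text) ≤ o ∧ o < PySem.Str.len text)
instance (text : String) (order : List Int) (n : Int) : Decidable (Pre_compute_character_classes text order n) := by unfold Pre_compute_character_classes; infer_instance
def pvWitness_compute_character_classes : String × List Int × Int := ("aba", [0, 2, 1], 3)

def Spec_compute_character_classes (text : String) (order : List Int) (n : Int) (out : List Int) : Prop := out = compute_character_classes_alt text order n
instance (text : String) (order : List Int) (n : Int) (out : List Int) : Decidable (Spec_compute_character_classes text order n out) := by unfold Spec_compute_character_classes; infer_instance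

-- ===== CLAIM (what is proved, stated in full; the proofs are below) =====
def Claim_equal_compute_character_classes : Prop := ∀ (text : String) (order : List Int) (n : Int), Dom_compute_character_classes text order n → Pre_compute_character_classes text order n → Spec_compute_character_classes text order n (compute_character_classes text order n)

-- ===== LEMMAS AND PROOFS =====

-- runs built by Source B's loop, as a structural recursion
def ccRuns (text : String) : List (Int × Int) → List Int → List (List Int)
  | [], cur => [cur]
  | p :: ps, cur =>
      if PySem.Str.pyGet? text p.1 ≠ PySem.Str.pyGet? text p.2 then
        cur :: ccRuns text ps [p.2]
      else
        ccRuns text ps (cur ++ [p.2])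

theorem ccRuns_foldl (text : String) (ps : List (Int × Int)) (rs : List (List Int)) (cur : List Int) :
    (let st := ps.foldl
      (fun (s : List (List Int) × List Int) (p : Int × Int) =>
        if PySem.Str.pyGet? text p.1 ≠ PySem.Str.pyGet? text p.2 then
          (s.1 ++ [s.2], [p.2])
        else
          (s.1, s.2 ++ [p.2])) (rs, cur)
     st.1 ++ [st.2]) = rs ++ ccRuns text ps cur := by
  induction ps generalizing rs cur with
  | nil => simp [ccRuns]
  | cons p ps ih =>
      by_cases h : PySem.List.pyGet? text.toList p.1 = PySem.List.pyGet? text.toList p.2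
      · simpa [ccRuns, PySem.Str.pyGet?, h] using ih rs (cur ++ [p.2])
      · simpa [ccRuns, PySem.Str.pyGet?, h] using ih (rs ++ [cur]) [p.2]

-- write a whole run with one label
def ccWrite (c : List Int) (r : List Int) (lab : Int) : List Int :=
  r.foldl (fun c idx => PySem.List.pySetD c idx lab) c

-- scatter a list of runs with consecutive labels starting at lab
def ccScat (c : List Int) (lab : Int) : List (List Int) → List Int
  | [] => c
  | r :: rs => ccScat (ccWrite c r lab) (lab + 1) rs

theorem ccScat_enumerate (runs : List (List Int)) (c : List Int) (lab : Int) :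
    (PySem.List.enumerate runs lab).foldl
      (fun (c : List Int) (lr : Int × List Int) =>
        lr.2.foldl (fun c idx => PySem.List.pySetD c idx lr.1) c) c
    = ccScat c lab runs := by
  induction runs generalizing c lab with
  | nil => simp [PySem.List.enumerate_nil, ccScat]
  | cons r rs ih => simp [PySem.List.enumerate_cons, ccScat, ccWrite, ih]

-- main invariant: A's loop from (classes with run 'cur' already written at
-- label 'lab') equals scattering the runs that B will still build from 'cur'
theorem cc_main (text : String) (rest : List Int) (o : Int) (c : List Int) (lab : Int) (cur : List Int) :
    (((o :: rest).zip rest).foldl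
      (fun (s : List Int × Int) (p : Int × Int) =>
        let label := if PySem.Str.pyGet? text p.1 ≠ PySem.Str.pyGet? text p.2 then s.2 + 1 else s.2
        (PySem.List.pySetD s.1 p.2 label, label))
      (ccWrite c cur lab, lab)).1
    = ccScat c lab (ccRuns text ((o :: rest).zip rest) cur) := by
  induction rest generalizing o c lab cur with
  | nil => simp [ccRuns, ccScat]
  | cons o2 rest ih =>
      simp only [List.zip_cons_cons, List.foldl_cons, ccRuns, PySem.Str.pyGet?]
      by_cases h : PySem.List.pyGet? text.toList o = PySem.List.pyGet? text.toList o2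
      · have : PySem.List.pySetD (ccWrite c cur lab) o2 lab = ccWrite c (cur ++ [o2]) lab := by
          simp [ccWrite]
        simpa [PySem.Str.pyGet?, h, this] using ih o2 c lab (cur ++ [o2])
      · have : PySem.List.pySetD (ccWrite c cur lab) o2 (lab + 1)
            = ccWrite (ccWrite c cur lab) [o2] (lab + 1) := by simp [ccWrite]
        simpa [PySem.Str.pyGet?, h, this, ccScat] using ih o2 (ccWrite c cur lab) (lab + 1) [o2]

-- ===== VERDICT (by name: the statement is the Claim_ definition above) =====
theorem compute_character_classes_spec : Claim_equal_compute_character_classes := by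
  intro text order n _ hpre
  unfold Spec_compute_character_classes compute_character_classes compute_character_classes_alt
  cases order with
  | nil => exact absurd rfl hpre.1
  | cons o rest =>
      simp only [List.tail_cons, PySem.List.pyGetD_zero_cons]
      rw [ccScat_enumerate, ccRuns_foldl]
      have hw : PySem.List.pySetD (List.replicate n.toNat (0 : Int)) o 0
          = ccWrite (List.replicate n.toNat 0) [o] 0 := by simp [ccWrite]
      rw [hw, cc_main]
      simp
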